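-- pv_equiv track=rewrite | github.com/harukamm/food-diary | main.py | parse_modifiers
-- ===== SOURCE A (Python) =====
-- def parse_modifiers(modifiers):
--     size = len(modifiers)
--     is_important = False
--     is_weakly_recommended = False
--
--     i = 0
--     while i < size:
--         c = modifiers[i]
--         next_c = modifiers[i + 1] if i + 1 < size else None
--
--         if c == '!':
--             is_important = True
--             i += 1
--         elif c == '(' and next_c == ')':
--             is_weakly_recommended = True
--             i += 2
--         else:
--             i += 1
--
--     return is_important, is_weakly_recommended
-- ===== SOURCE B (Python) =====
-- def parse_modifiers(modifiers):
--     # Two direct substring/membership tests instead of an index-driven scan.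
--     return '!' in modifiers, '()' in modifiers
-- ===== Notes on version B (the rewrite author's own statement) =====
-- stated objective: simpler
-- what changed: Replaced the hand-written index loop with skip-by-2 state tracking by two direct substring membership tests (the bang character and the paren pair); the loop's skip over a matched closing paren never hides another occurrence, so the results agree everywhere.
import Mathlib
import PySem

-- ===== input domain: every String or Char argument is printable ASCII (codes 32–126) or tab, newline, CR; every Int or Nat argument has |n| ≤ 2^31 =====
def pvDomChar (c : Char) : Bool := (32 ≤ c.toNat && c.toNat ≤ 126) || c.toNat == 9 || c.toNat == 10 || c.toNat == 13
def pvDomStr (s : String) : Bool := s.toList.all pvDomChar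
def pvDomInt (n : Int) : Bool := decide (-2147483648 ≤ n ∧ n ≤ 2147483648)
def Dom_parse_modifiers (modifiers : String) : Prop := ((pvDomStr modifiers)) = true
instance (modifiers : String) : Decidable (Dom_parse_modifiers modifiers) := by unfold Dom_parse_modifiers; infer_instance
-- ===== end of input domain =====

-- B replaces A's index-driven combined scan with two library substring membership tests (simpler).

-- ===== PORT A =====
-- the while loop over indices, as structural recursion over the remaining characters:
-- '!' consumes one char, '(' followed by ')' consumes two, anything else consumes one.
def parse_modifiers_loop : List Char → Bool → Bool → Bool × Bool
  | [], imp, weak => (imp, weak)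
  | c :: rest, imp, weak =>
    if c = '!' then parse_modifiers_loop rest true weak
    else if c = '(' ∧ rest.head? = some ')' then parse_modifiers_loop rest.tail imp true
    else parse_modifiers_loop rest imp weak
termination_by l _ _ => l.length
decreasing_by all_goals (simp [List.length_tail]; try omega)

def parse_modifiers (modifiers : String) : Bool × Bool :=
  parse_modifiers_loop modifiers.toList false false

-- ===== PORT B =====
def parse_modifiers_alt (modifiers : String) : Bool × Bool :=
  (PySem.Str.isIn "!" modifiers, PySem.Str.isIn "()" modifiers)

-- ===== PRECONDITION & SPEC =====
def Spec_parse_modifiers (modifiers : String) (out : Bool × Bool) : Prop := out = parse_modifiers_alt modifiers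
instance (modifiers : String) (out : Bool × Bool) : Decidable (Spec_parse_modifiers modifiers out) := by unfold Spec_parse_modifiers; infer_instance

-- ===== CLAIM (what is proved, stated in full; the proofs are below) =====
def Claim_equal_parse_modifiers : Prop := ∀ (modifiers : String), Dom_parse_modifiers modifiers → Spec_parse_modifiers modifiers (parse_modifiers modifiers)

-- ===== LEMMAS AND PROOFS =====

lemma loop_characterisation (l : List Char) (imp weak : Bool) :
    parse_modifiers_loop l imp weak =
      (imp || decide (['!'] <:+: l), weak || decide (['(', ')'] <:+: l)) := by
  fun_induction parse_modifiers_loop l imp weak with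
  | case1 imp weak => simp
  | case2 rest imp weak ih =>
      rw [ih]
      congr 1
      · simp [List.infix_cons_iff]
      · have hnp : ¬ (['(', ')'] <+: '!' :: rest) := by
          simp [List.cons_prefix_cons]
        simp [List.infix_cons_iff, hnp]
  | case3 c rest imp weak hc h ih =>
      obtain ⟨hco, hh⟩ := h
      subst hco
      obtain ⟨rest2, hr⟩ : ∃ rest2, rest = ')' :: rest2 := by
        cases rest with
        | nil => simp at hh
        | cons a t => simp at hh; exact ⟨t, by rw [hh]⟩
      subst hr
      rw [ih]
      congr 1
      · have h1 : (['!'] <:+: '(' :: ')' :: rest2) ↔ (['!'] <:+: rest2) := by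
          simp [List.infix_cons_iff, List.cons_prefix_cons]
        simp only [List.tail_cons, h1]
        rfl
      · have : (['(', ')'] <+: '(' :: ')' :: rest2) := by
          simp [List.cons_prefix_cons]
        simp [List.infix_cons_iff, this]
  | case4 c rest imp weak hc h ih =>
      rw [ih]
      congr 1
      · have h1 : (['!'] <:+: c :: rest) ↔ (['!'] <:+: rest) := by
          simp [List.infix_cons_iff, List.cons_prefix_cons]
          intro hE
          exact absurd hE.symm hc
        simp [h1]
      · have hnp : ¬ (['(', ')'] <+: c :: rest) := by
          intro hp
          rw [List.cons_prefix_cons] at hp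
          obtain ⟨hce, hp2⟩ := hp
          apply h
          refine ⟨hce.symm, ?_⟩
          cases rest with
          | nil => simp at hp2
          | cons a t =>
              rw [List.cons_prefix_cons] at hp2
              simp [hp2.1.symm]
        simp [List.infix_cons_iff, hnp]

-- ===== VERDICT (by name: the statement is the Claim_ definition above) =====
theorem parse_modifiers_spec : Claim_equal_parse_modifiers := by
  intro m _
  unfold Spec_parse_modifiers parse_modifiers parse_modifiers_alt
  rw [loop_characterisation]
  congr 1
  · have := PySem.Str.isIn_iff_infix (sub := "!") (s := m)
    simp only [Bool.false_or]
    rcases hb : PySem.Str.isIn "!" m with _ | _ <;> simp_all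
  · have := PySem.Str.isIn_iff_infix (sub := "()") (s := m)
    simp only [Bool.false_or]
    rcases hb : PySem.Str.isIn "()" m with _ | _ <;> simp_all
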